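-- pv_equiv track=rewrite | github.com/romeorizzi/TALight | problems/number_theory/infinity_of_N/services/archimede/python/simple/archimede_server.py | decimals_of_reciprocal_of
-- ===== SOURCE A (Python) =====
-- def decimals_of_reciprocal_of(n, length):
--     assert n > 1
--     risp = ""
--     div = 10
--     while length > 0:
--         length -= 1
--         risp += chr(ord("0") + div//n)
--         div = (div%n)*10
--     return risp
-- ===== SOURCE B (Python) =====
-- def decimals_of_reciprocal_of(n, length):
--     assert n > 1
--     return "".join(chr(ord("0") + (10 * pow(10, k, n)) // n) for k in range(length))
-- ===== Notes on version B (the rewrite author's own statement) =====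
-- stated objective: faster
-- what changed: Replaces A's sequential remainder-carrying while-loop with repeated string concatenation by an independent closed-form formula per digit, digit k = (10 * pow(10, k, n)) // n, joined over range(length).
import Mathlib
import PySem

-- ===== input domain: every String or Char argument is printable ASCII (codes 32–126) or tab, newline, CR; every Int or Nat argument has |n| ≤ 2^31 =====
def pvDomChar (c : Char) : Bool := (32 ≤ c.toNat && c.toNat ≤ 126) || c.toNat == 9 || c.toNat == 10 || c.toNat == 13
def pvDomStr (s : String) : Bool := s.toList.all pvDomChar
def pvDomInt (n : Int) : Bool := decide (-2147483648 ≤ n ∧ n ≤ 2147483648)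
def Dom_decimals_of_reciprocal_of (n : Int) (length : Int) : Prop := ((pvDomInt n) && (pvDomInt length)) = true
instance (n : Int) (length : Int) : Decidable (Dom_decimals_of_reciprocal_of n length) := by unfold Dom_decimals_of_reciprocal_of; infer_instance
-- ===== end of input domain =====

-- B replaces A's sequential remainder-carrying loop by an independent closed-form
-- formula per digit (digit k = (10 * (10^k mod n)) // n, Python pow(10, k, n)): alternative decomposition, similar cost.

-- ===== PORT A =====
-- the while-loop of A: state (risp, div), fuel = remaining length
def pvALoop (n : Int) : Nat → String → Int → String
  | 0, risp, _ => risp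
  | k + 1, risp, div =>
      pvALoop n k (risp.push (Char.ofNat ((48 + PySem.Int.floordiv div n).toNat)))
        ((PySem.Int.mod div n) * 10)

def decimals_of_reciprocal_of (n : Int) (length : Int) : String :=
  -- assert n > 1 : inputs with n ≤ 1 raise AssertionError, excluded by Pre_
  pvALoop n length.toNat "" 10

-- ===== PORT B =====
-- pow(10, k, n) is ported as (10^k % n), exact for n > 0 (guaranteed by Pre_)
def decimals_of_reciprocal_of_alt (n : Int) (length : Int) : String :=
  String.ofList ((List.range length.toNat).map (fun k =>
    Char.ofNat ((48 + PySem.Int.floordiv (10 * ((10:Int) ^ k % n)) n).toNat)))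

-- ===== PRECONDITION & SPEC =====
-- A asserts n > 1 (AssertionError otherwise); that is the only exclusion.
def Pre_decimals_of_reciprocal_of (n : Int) (length : Int) : Prop := 2 ≤ n
instance (n : Int) (length : Int) : Decidable (Pre_decimals_of_reciprocal_of n length) := by unfold Pre_decimals_of_reciprocal_of; infer_instance
def pvWitness_decimals_of_reciprocal_of : Int × Int := (7, 12)

def Spec_decimals_of_reciprocal_of (n : Int) (length : Int) (out : String) : Prop := out = decimals_of_reciprocal_of_alt n length
instance (n : Int) (length : Int) (out : String) : Decidable (Spec_decimals_of_reciprocal_of n length out) := by unfold Spec_decimals_of_reciprocal_of; infer_instance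

-- ===== CLAIM (what is proved, stated in full; the proofs are below) =====
def Claim_equal_decimals_of_reciprocal_of : Prop := ∀ (n : Int) (length : Int), Dom_decimals_of_reciprocal_of n length → Pre_decimals_of_reciprocal_of n length → Spec_decimals_of_reciprocal_of n length (decimals_of_reciprocal_of n length)

-- ===== LEMMAS AND PROOFS =====

lemma pvModMul (a n : Int) : (a % n * 10) % n = (a * 10) % n := by
  rw [Int.mul_emod, Int.emod_emod_of_dvd a dvd_rfl, ← Int.mul_emod]

-- loop invariant: div at step j equals (10^j mod n) * 10
lemma pvALoop_eq (n : Int) (hn : 2 ≤ n) : ∀ (k j : Nat) (s : String),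
    pvALoop n k s (((10:Int) ^ j % n) * 10) =
    String.ofList (s.toList ++ (List.range k).map (fun i =>
      Char.ofNat ((48 + PySem.Int.floordiv (10 * ((10:Int) ^ (j + i) % n)) n).toNat))) := by
  intro k
  induction k with
  | zero => intro j s; simp [pvALoop]
  | succ k ih =>
    intro j s
    rw [pvALoop]
    rw [show PySem.Int.mod ((10:Int) ^ j % n * 10) n = (10:Int) ^ (j + 1) % n from by
      rw [PySem.Int.mod_eq_emod_of_pos (by omega), pvModMul, ← pow_succ]]
    rw [ih (j + 1)]
    refine congrArg String.ofList ?_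
    rw [List.range_succ_eq_map, List.map_cons, List.map_map]
    simp only [String.toList_push, List.append_assoc, List.singleton_append]
    refine congrArg _ ?_
    congr 1
    · rw [show ((10:Int) ^ j % n * 10) = 10 * ((10:Int) ^ j % n) from mul_comm _ _]
      simp
    · apply List.map_congr_left
      intro i _
      simp only [Function.comp_apply]
      rw [show j + 1 + i = j + Nat.succ i from by omega]

-- ===== VERDICT (by name: the statement is the Claim_ definition above) =====
theorem decimals_of_reciprocal_of_spec : Claim_equal_decimals_of_reciprocal_of := by
  intro n length _ hpre
  have hn : 2 ≤ n := hpre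
  unfold Spec_decimals_of_reciprocal_of decimals_of_reciprocal_of decimals_of_reciprocal_of_alt
  have key := pvALoop_eq n hn length.toNat 0 ""
  rw [pow_zero, Int.emod_eq_of_lt (by omega) (by omega), one_mul] at key
  rw [key]
  simp
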